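-- pv_equiv track=rewrite | github.com/Laurenwork/Phishing-Detection-using-Machine-Learning-with-Decision-Tree-Bagging | content_analysis.py | is_official_domain
-- ===== SOURCE A (Python) =====
-- def is_official_domain(domain, brand):
--     """Check if a domain is likely the official one for a brand"""
--     official_domains = {
--         'paypal': ['paypal.com'],
--         'apple': ['apple.com', 'icloud.com'],
--         'google': ['google.com', 'gmail.com', 'youtube.com'],
--         'microsoft': ['microsoft.com', 'live.com', 'office.com', 'office365.com', 'outlook.com'],
--         'amazon': ['amazon.com', 'amazon.co.uk', 'amazon.ca', 'amazon.de', 'amazon.fr'],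
--         'facebook': ['facebook.com', 'fb.com', 'instagram.com', 'whatsapp.com'],
--         'netflix': ['netflix.com'],
--         'bank': [], # Sangat general, ditanganani terpisah
--         'ebay': ['ebay.com', 'ebay.co.uk', 'ebay.ca', 'ebay.de'],
--         'dropbox': ['dropbox.com'],
--         'yahoo': ['yahoo.com'],
--         'wellsfargo': ['wellsfargo.com'],
--         'chase': ['chase.com'],
--         'hsbc': ['hsbc.com'],
--         'binance': ['binance.com', 'binance.us'],
--         'coinbase': ['coinbase.com']
--     }
--
--     # Jika kita memiliki domain resmi yang terdaftar untuk merek ini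
--     if brand in official_domains:
--         return any(domain == od or domain.endswith('.' + od) for od in official_domains[brand])
--
--     # Untuk istilah umum seperti 'bank', periksa apakah itu adalah domain bank yang terkenal.
--     if brand == 'bank':
--         known_banks = ['chase.com', 'bankofamerica.com', 'wellsfargo.com', 'citibank.com',
--                        'capitalone.com', 'usbank.com', 'pnc.com', 'tdbank.com']
--         return any(domain == bank or domain.endswith('.' + bank) for bank in known_banks)
--
--     # Secara default diatur ke False untuk merek yang tidak diketahui
--     return False
-- ===== SOURCE B (Python) =====
-- OFFICIAL_DOMAINS = {
--     'paypal': ['paypal.com'],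
--     'apple': ['apple.com', 'icloud.com'],
--     'google': ['google.com', 'gmail.com', 'youtube.com'],
--     'microsoft': ['microsoft.com', 'live.com', 'office.com', 'office365.com', 'outlook.com'],
--     'amazon': ['amazon.com', 'amazon.co.uk', 'amazon.ca', 'amazon.de', 'amazon.fr'],
--     'facebook': ['facebook.com', 'fb.com', 'instagram.com', 'whatsapp.com'],
--     'netflix': ['netflix.com'],
--     'bank': [],
--     'ebay': ['ebay.com', 'ebay.co.uk', 'ebay.ca', 'ebay.de'],
--     'dropbox': ['dropbox.com'],
--     'yahoo': ['yahoo.com'],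
--     'wellsfargo': ['wellsfargo.com'],
--     'chase': ['chase.com'],
--     'hsbc': ['hsbc.com'],
--     'binance': ['binance.com', 'binance.us'],
--     'coinbase': ['coinbase.com']
-- }
--
--
-- def _after_dot(s):
--     """The part of s after its first '.', or None if s has no dot."""
--     for i, ch in enumerate(s):
--         if ch == '.':
--             return s[i + 1:]
--     return None
--
--
-- def is_official_domain(domain, brand):
--     """Check if a domain is likely the official one for a brand"""
--     officials = OFFICIAL_DOMAINS.get(brand)
--     if officials is None:
--         return False
--     targets = set(officials)
--     candidate = domain
--     while candidate is not None:
--         if candidate in targets: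
--             return True
--         candidate = _after_dot(candidate)
--     return False
-- ===== Notes on version B (the rewrite author's own statement) =====
-- stated objective: alternative
-- what changed: Instead of scanning the brand's official-domain list and testing each entry with == / endswith('.'+od), B looks the brand up once, puts its official domains in a set, and walks the domain's dot-suffix chain (the domain, then the part after each successive first dot), returning whether any suffix is in the set; the dead known_banks branch is not reproduced (bank still always yields False because 'bank' maps to []).
import Mathlib
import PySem

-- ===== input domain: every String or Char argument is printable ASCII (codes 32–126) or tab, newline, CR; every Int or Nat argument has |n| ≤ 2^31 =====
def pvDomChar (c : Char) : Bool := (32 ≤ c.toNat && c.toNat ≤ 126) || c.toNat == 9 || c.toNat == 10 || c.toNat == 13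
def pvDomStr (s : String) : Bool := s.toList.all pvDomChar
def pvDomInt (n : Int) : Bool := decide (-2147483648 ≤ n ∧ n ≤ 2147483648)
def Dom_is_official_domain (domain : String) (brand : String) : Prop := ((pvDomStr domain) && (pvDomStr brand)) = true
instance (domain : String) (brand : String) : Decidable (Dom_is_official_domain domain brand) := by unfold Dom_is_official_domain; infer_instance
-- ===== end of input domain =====

-- B walks the domain's dot-suffix chain with set membership instead of scanning the brand's official list with ==/endswith; alternative traversal, same results.

-- ===== PORT A =====
-- A's in-function dict literal, named as a helper constant
def official_domains_A : PySem.Dict String (List String) := PySem.Dict.ofList [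
  ("paypal", ["paypal.com"]),
  ("apple", ["apple.com", "icloud.com"]),
  ("google", ["google.com", "gmail.com", "youtube.com"]),
  ("microsoft", ["microsoft.com", "live.com", "office.com", "office365.com", "outlook.com"]),
  ("amazon", ["amazon.com", "amazon.co.uk", "amazon.ca", "amazon.de", "amazon.fr"]),
  ("facebook", ["facebook.com", "fb.com", "instagram.com", "whatsapp.com"]),
  ("netflix", ["netflix.com"]),
  ("bank", []),
  ("ebay", ["ebay.com", "ebay.co.uk", "ebay.ca", "ebay.de"]),
  ("dropbox", ["dropbox.com"]),
  ("yahoo", ["yahoo.com"]),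
  ("wellsfargo", ["wellsfargo.com"]),
  ("chase", ["chase.com"]),
  ("hsbc", ["hsbc.com"]),
  ("binance", ["binance.com", "binance.us"]),
  ("coinbase", ["coinbase.com"])]

def is_official_domain (domain : String) (brand : String) : Bool :=
  if official_domains_A.contains brand then
    (official_domains_A.getD brand []).any (fun od =>
      domain == od || PySem.Str.endswith domain ("." ++ od))
  else if brand == "bank" then
    ["chase.com", "bankofamerica.com", "wellsfargo.com", "citibank.com",
     "capitalone.com", "usbank.com", "pnc.com", "tdbank.com"].any (fun bank =>
      domain == bank || PySem.Str.endswith domain ("." ++ bank))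
  else
    false

-- ===== PORT B =====
def OFFICIAL_DOMAINS : PySem.Dict String (List String) := PySem.Dict.ofList [
  ("paypal", ["paypal.com"]),
  ("apple", ["apple.com", "icloud.com"]),
  ("google", ["google.com", "gmail.com", "youtube.com"]),
  ("microsoft", ["microsoft.com", "live.com", "office.com", "office365.com", "outlook.com"]),
  ("amazon", ["amazon.com", "amazon.co.uk", "amazon.ca", "amazon.de", "amazon.fr"]),
  ("facebook", ["facebook.com", "fb.com", "instagram.com", "whatsapp.com"]),
  ("netflix", ["netflix.com"]),
  ("bank", []),
  ("ebay", ["ebay.com", "ebay.co.uk", "ebay.ca", "ebay.de"]),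
  ("dropbox", ["dropbox.com"]),
  ("yahoo", ["yahoo.com"]),
  ("wellsfargo", ["wellsfargo.com"]),
  ("chase", ["chase.com"]),
  ("hsbc", ["hsbc.com"]),
  ("binance", ["binance.com", "binance.us"]),
  ("coinbase", ["coinbase.com"])]

-- Source B's _after_dot: the part of the string after its first '.', or none
def afterDot : List Char → Option (List Char)
  | [] => none
  | c :: rest => if c == '.' then some rest else afterDot rest

-- termination measure for the suffix-chain loop (cited by suffixHit's decreasing_by)
theorem afterDot_length {cs r : List Char} (h : afterDot cs = some r) : r.length < cs.length := by
  induction cs with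
  | nil => simp [afterDot] at h
  | cons c rest ih =>
    by_cases hc : c == '.'
    · simp only [afterDot, hc, if_pos, Option.some.injEq] at h
      subst h; simp
    · simp only [afterDot, hc] at h
      simp only [Bool.false_eq_true, if_false] at h
      exact Nat.lt_succ_of_lt (ih h)

-- Source B's while-loop: does any dot-suffix of candidate lie in targets?
def suffixHit (targets : PySem.Set String) (candidate : List Char) : Bool :=
  if targets.contains (String.ofList candidate) then true
  else
    match h : afterDot candidate with
    | none => false
    | some r => suffixHit targets r
termination_by candidate.length
decreasing_by exact afterDot_length h

def is_official_domain_alt (domain : String) (brand : String) : Bool :=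
  match OFFICIAL_DOMAINS.get? brand with
  | none => false
  | some officials => suffixHit (PySem.Set.ofList officials) domain.toList

-- ===== PRECONDITION & SPEC =====
def Spec_is_official_domain (domain : String) (brand : String) (out : Bool) : Prop := out = is_official_domain_alt domain brand
instance (domain : String) (brand : String) (out : Bool) : Decidable (Spec_is_official_domain domain brand out) := by unfold Spec_is_official_domain; infer_instance

-- ===== CLAIM (what is proved, stated in full; the proofs are below) =====
def Claim_equal_is_official_domain : Prop := ∀ (domain : String) (brand : String), Dom_is_official_domain domain brand → Spec_is_official_domain domain brand (is_official_domain domain brand)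

-- ===== LEMMAS AND PROOFS =====

-- '.'::t is a suffix of cs iff cs has a first dot and t is the tail after it or '.'::t is a suffix of that tail
theorem dotSuffix_iff (cs t : List Char) :
    ('.' :: t) <:+ cs ↔ ∃ r, afterDot cs = some r ∧ (t = r ∨ ('.' :: t) <:+ r) := by
  induction cs with
  | nil => simp [afterDot]
  | cons c rest ih =>
    rw [List.suffix_cons_iff]
    by_cases hc : c = '.'
    · subst hc
      simp [afterDot]
    · have hb' : (c == '.') = false := by
        simp only [beq_eq_false_iff_ne, ne_eq]; exact hc
      simp only [afterDot, hb', Bool.false_eq_true, if_false]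
      constructor
      · rintro (h | h)
        · injection h with h1 _
          exact absurd h1.symm hc
        · exact ih.mp h
      · intro h
        exact Or.inr (ih.mpr h)

-- characterisation of Source B's suffix-chain loop
theorem suffixHit_iff (L : List String) (cs : List Char) :
    suffixHit (PySem.Set.ofList L) cs = true ↔
      ∃ od ∈ L, od.toList = cs ∨ ('.' :: od.toList) <:+ cs := by
  have main : ∀ n, ∀ cs : List Char, cs.length < n →
      (suffixHit (PySem.Set.ofList L) cs = true ↔
        ∃ od ∈ L, od.toList = cs ∨ ('.' :: od.toList) <:+ cs) := by
    intro n
    induction n with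
    | zero => intro cs h; exact absurd h (Nat.not_lt_zero _)
    | succ n ih =>
      intro cs hlen
      rw [suffixHit]
      by_cases hc : (PySem.Set.ofList L).contains (String.ofList cs) = true
      · rw [if_pos hc]
        constructor
        · intro _
          refine ⟨String.ofList cs, ?_, Or.inl (by simp)⟩
          exact (PySem.Set.mem_ofList L _).mp ((PySem.Set.contains_iff _ _).mp hc)
        · intro _; rfl
      · rw [if_neg hc]
        have hnotmem : ∀ od ∈ L, od.toList ≠ cs := by
          intro od hod heq
          apply hc
          have hmem : od ∈ PySem.Set.ofList L := (PySem.Set.mem_ofList L od).mpr hod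
          have hstr : String.ofList cs = od := by rw [← heq]; simp
          exact (PySem.Set.contains_iff _ _).mpr (hstr ▸ hmem)
        split
        · next ha =>
          constructor
          · intro h; exact absurd h (by simp)
          · rintro ⟨od, hod, heq | hsuf⟩
            · exact absurd heq (hnotmem od hod)
            · rcases (dotSuffix_iff cs od.toList).mp hsuf with ⟨r, hr, _⟩
              rw [ha] at hr; cases hr
        · next r ha =>
          rw [ih r (by have := afterDot_length ha; omega)]
          constructor
          · rintro ⟨od, hod, h⟩
            exact ⟨od, hod, Or.inr ((dotSuffix_iff cs od.toList).mpr ⟨r, ha, h⟩)⟩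
          · rintro ⟨od, hod, heq | hsuf⟩
            · exact absurd heq (hnotmem od hod)
            · rcases (dotSuffix_iff cs od.toList).mp hsuf with ⟨r', hr', hd⟩
              rw [ha] at hr'
              injection hr' with hrr
              subst hrr
              exact ⟨od, hod, hd⟩
  exact main (cs.length + 1) cs (Nat.lt_succ_self _)

-- characterisation of A's any-scan over the official list
theorem anyA_iff (L : List String) (domain : String) :
    (L.any fun od => domain == od || PySem.Str.endswith domain ("." ++ od)) = true ↔
      ∃ od ∈ L, od.toList = domain.toList ∨ ('.' :: od.toList) <:+ domain.toList := by
  have hdot : ∀ od : String, ("." ++ od).toList = '.' :: od.toList := by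
    intro od; simp
  simp only [List.any_eq_true, Bool.or_eq_true, beq_iff_eq, PySem.Str.endswith_eq,
    PySem.Chars.endswith_iff, hdot]
  constructor
  · rintro ⟨od, hod, h | h⟩
    · exact ⟨od, hod, Or.inl (by rw [h])⟩
    · exact ⟨od, hod, Or.inr h⟩
  · rintro ⟨od, hod, h | h⟩
    · refine ⟨od, hod, Or.inl ?_⟩
      have h2 := congrArg String.ofList h
      simpa using h2.symm
    · exact ⟨od, hod, Or.inr h⟩

-- ===== VERDICT (by name: the statement is the Claim_ definition above) =====
theorem is_official_domain_spec : Claim_equal_is_official_domain := by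
  intro domain brand _
  show is_official_domain domain brand = is_official_domain_alt domain brand
  unfold is_official_domain is_official_domain_alt
  have hAB : official_domains_A = OFFICIAL_DOMAINS := rfl
  cases hg : OFFICIAL_DOMAINS.get? brand with
  | none =>
    have hcon : official_domains_A.contains brand = false := by
      rw [PySem.Dict.contains_eq_isSome_get?, hAB, hg]; rfl
    have hb2 : (brand == "bank") = false := by
      simp only [beq_eq_false_iff_ne, ne_eq]
      intro h; subst h
      have hbank : OFFICIAL_DOMAINS.get? "bank" = some [] := by decide
      rw [hbank] at hg; cases hg
    simp [hcon, hb2]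
  | some L =>
    have hcon : official_domains_A.contains brand = true := by
      rw [PySem.Dict.contains_eq_isSome_get?, hAB, hg]; rfl
    have hgetD : official_domains_A.getD brand [] = L := by
      have h1 : official_domains_A.getD brand [] = (OFFICIAL_DOMAINS.get? brand).getD [] := rfl
      rw [h1, hg]; rfl
    rw [if_pos hcon, hgetD, Bool.eq_iff_iff, anyA_iff L domain, suffixHit_iff L domain.toList]
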